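-- pv_equiv track=rewrite | github.com/HuangFuSL/python-issues | pyissues/cli.py | _get_tab_width
-- ===== SOURCE A (Python) =====
-- from typing import Dict, Iterable, List
--
-- _WIDTH = 80
--
-- def _get_tab_width(
--         tabs: int,
--         width: int = _WIDTH,
--         field: int = 0) -> Iterable[int]:
--     splits = tabs + 1
--     spaces = splits * 2 - 2
--     a, b = divmod(width - splits - spaces, tabs)
--     return [a + (1 if _ < b else 0) - field for _ in range(tabs)]
-- ===== SOURCE B (Python) =====
-- from typing import Dict, Iterable, List
--
-- _WIDTH = 80
--
-- def _get_tab_width(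
--         tabs: int,
--         width: int = _WIDTH,
--         field: int = 0) -> Iterable[int]:
--     # Greedy fair division: each tab takes the ceiling of its fair share of
--     # the space still remaining; no divmod, no per-index conditional.
--     out: List[int] = []
--     remaining = width - 3 * tabs - 1
--     for k in range(tabs, 0, -1):
--         w = -(-remaining // k)  # ceil(remaining / k)
--         out.append(w - field)
--         remaining -= w
--     return out
-- ===== Notes on version B (the rewrite author's own statement) =====
-- stated objective: alternative
-- what changed: Replaces the upfront divmod plus index-conditioned comprehension by a single-pass greedy fair-division loop: for k = tabs..1 each tab takes ceil(remaining/k) of the space still remaining, so no quotient/remainder pair and no per-index comparison exist.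
import Mathlib
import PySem

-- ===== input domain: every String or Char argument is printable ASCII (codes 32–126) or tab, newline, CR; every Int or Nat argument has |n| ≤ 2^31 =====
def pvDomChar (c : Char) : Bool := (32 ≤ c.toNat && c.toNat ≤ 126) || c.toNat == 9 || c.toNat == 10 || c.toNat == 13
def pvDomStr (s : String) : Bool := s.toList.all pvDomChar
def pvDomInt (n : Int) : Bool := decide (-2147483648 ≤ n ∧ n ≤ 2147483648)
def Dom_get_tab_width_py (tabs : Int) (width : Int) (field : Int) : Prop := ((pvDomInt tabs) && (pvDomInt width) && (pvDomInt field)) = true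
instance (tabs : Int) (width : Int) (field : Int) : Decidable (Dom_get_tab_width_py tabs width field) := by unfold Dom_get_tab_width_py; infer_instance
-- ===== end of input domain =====

-- B replaces the divmod + index-conditioned comprehension by a single-pass greedy fair-division
-- loop (each tab takes ceil(remaining/k) of the remaining space); objective: alternative algorithm.


-- ===== PORT A =====
def get_tab_width_py (tabs : Int) (width : Int) (field : Int) : List Int :=
  let splits := tabs + 1
  let spaces := splits * 2 - 2
  match PySem.Int.divmod? (width - splits - spaces) tabs with
  | none => []  -- ZeroDivisionError; excluded by Pre_
  | some (a, b) =>
    (PySem.List.pyRange 0 tabs 1).map (fun i => a + (if i < b then 1 else 0) - field)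

-- ===== PORT B =====
def get_tab_width_py_alt (tabs : Int) (width : Int) (field : Int) : List Int :=
  -- out = []; remaining = width - 3*tabs - 1; for k in range(tabs, 0, -1): w = -(-remaining // k); out.append(w - field); remaining -= w
  ((PySem.List.pyRange tabs 0 (-1)).foldl
    (fun (st : Int × List Int) k =>
      let w := -(PySem.Int.floordiv (-st.1) k)
      (st.1 - w, st.2 ++ [w - field]))
    (width - 3 * tabs - 1, ([] : List Int))).2

-- ===== PRECONDITION & SPEC =====
-- Pre_ excludes exactly tabs = 0, where Python's divmod raises ZeroDivisionError.
def Pre_get_tab_width_py (tabs : Int) (width : Int) (field : Int) : Prop := tabs ≠ 0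
instance (tabs : Int) (width : Int) (field : Int) : Decidable (Pre_get_tab_width_py tabs width field) := by unfold Pre_get_tab_width_py; infer_instance
def pvWitness_get_tab_width_py : Int × Int × Int := (4, 80, 0)

def Spec_get_tab_width_py (tabs : Int) (width : Int) (field : Int) (out : List Int) : Prop := out = get_tab_width_py_alt tabs width field
instance (tabs : Int) (width : Int) (field : Int) (out : List Int) : Decidable (Spec_get_tab_width_py tabs width field out) := by unfold Spec_get_tab_width_py; infer_instance

-- ===== CLAIM (what is proved, stated in full; the proofs are below) =====
def Claim_equal_get_tab_width_py : Prop := ∀ (tabs : Int) (width : Int) (field : Int), Dom_get_tab_width_py tabs width field → Pre_get_tab_width_py tabs width field → Spec_get_tab_width_py tabs width field (get_tab_width_py tabs width field)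

-- ===== LEMMAS AND PROOFS =====

-- Proof-side view of B's loop: the tail of the computation from a given remaining and k tabs left.
def pvTakeB (field : Int) (remaining : Int) (k : Nat) : List Int :=
  match k with
  | 0 => []
  | Nat.succ k' =>
    let w := -(PySem.Int.floordiv (-remaining) ((k' + 1 : Nat) : Int))
    (w - field) :: pvTakeB field (remaining - w) k'

-- B's fold over range(k, 0, -1) appends exactly pvTakeB to the accumulator.
theorem foldB_eq_pvTakeB (field : Int) (k : Nat) (R : Int) (acc : List Int) :
    ((PySem.List.pyRange (k : Int) 0 (-1)).foldl
      (fun (st : Int × List Int) j =>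
        let w := -(PySem.Int.floordiv (-st.1) j)
        (st.1 - w, st.2 ++ [w - field])) (R, acc)).2
      = acc ++ pvTakeB field R k := by
  induction k generalizing R acc with
  | zero => simp [PySem.List.pyRange_neg_one_eq_nil (le_refl (0 : Int)), pvTakeB]
  | succ k' ih =>
    have hc : PySem.List.pyRange ((k' + 1 : Nat) : Int) 0 (-1)
        = ((k' + 1 : Nat) : Int) :: PySem.List.pyRange (((k' + 1 : Nat) : Int) - 1) 0 (-1) :=
      PySem.List.pyRange_neg_one_cons (by exact_mod_cast Nat.succ_pos k')
    have hk : ((k' + 1 : Nat) : Int) - 1 = (k' : Int) := by push_cast; ring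
    rw [hc, hk, List.foldl_cons]
    dsimp only
    rw [ih]
    simp [pvTakeB]

-- A's comprehension over range(tabs) with the `i < b` test is two replicated blocks.
theorem map_range_split (x y : Int) (n b : Int) (h0 : 0 ≤ b) (hb : b ≤ n) :
    (PySem.List.pyRange 0 n 1).map (fun i => if i < b then x else y)
      = List.replicate b.toNat x ++ List.replicate (n - b).toNat y := by
  rw [PySem.List.pyRange_one_append 0 b n h0 hb, List.map_append]
  congr 1
  · rw [List.map_congr_left (g := fun _ => x)
      (fun i hi => by rw [PySem.List.mem_pyRange_one] at hi; simp [hi.2])]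
    simp [List.map_const', PySem.List.length_pyRange_one]
  · rw [List.map_congr_left (g := fun _ => y)
      (fun i hi => by
        rw [PySem.List.mem_pyRange_one] at hi
        simp [not_lt.mpr hi.1])]
    simp [List.map_const', PySem.List.length_pyRange_one]

-- The greedy recursion on remaining = a*k + b (0 ≤ b, extras b confined below k or k = 0)
-- yields b copies of a+1-field followed by k-b copies of a-field.
theorem pvTakeB_blocks (field a : Int) (k : Nat) (b : Int)
    (h0 : 0 ≤ b) (hb : b < (k : Int) ∨ (k = 0 ∧ b = 0)) :
    pvTakeB field (a * k + b) k
      = List.replicate b.toNat (a + 1 - field) ++ List.replicate ((k : Int) - b).toNat (a - field) := by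
  induction k generalizing b with
  | zero =>
    rcases hb with hb | ⟨_, hb⟩
    · exfalso; simp at hb; omega
    · simp [pvTakeB, hb]
  | succ k' ih =>
    have hk : (0 : Int) < (k' + 1 : Nat) := by exact_mod_cast Nat.succ_pos k'
    have hbk : b < ((k' : Int) + 1) := by
      rcases hb with hb | ⟨h, _⟩
      · exact_mod_cast hb
      · exact absurd h (Nat.succ_ne_zero k')
    by_cases hbpos : 0 < b
    · -- this tab takes a + 1
      have hw : -(PySem.Int.floordiv (-(a * ((k' + 1 : Nat) : Int) + b)) ((k' + 1 : Nat) : Int)) = a + 1 := by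
        rw [PySem.Int.neg_floordiv_neg_eq_iff_of_pos hk]
        push_cast
        constructor <;> nlinarith
      rw [pvTakeB]
      simp only [hw]
      have hrem : a * ((k' + 1 : Nat) : Int) + b - (a + 1) = a * (k' : Int) + (b - 1) := by
        push_cast; ring
      rw [hrem]
      have := ih (b - 1) (by omega) (by left; omega)
      rw [this]
      have h1 : b.toNat = (b - 1).toNat + 1 := by omega
      have h2 : (((k' + 1 : Nat) : Int) - b).toNat = ((k' : Int) - (b - 1)).toNat := by
        push_cast; omega
      rw [h1, h2, List.replicate_succ]
      simp
    · -- b = 0 : this tab takes a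
      have hb0 : b = 0 := by omega
      subst hb0
      have hw : -(PySem.Int.floordiv (-(a * ((k' + 1 : Nat) : Int) + 0)) ((k' + 1 : Nat) : Int)) = a := by
        rw [PySem.Int.neg_floordiv_neg_eq_iff_of_pos hk]
        push_cast
        constructor <;> nlinarith
      rw [pvTakeB]
      simp only [hw]
      have hrem : a * ((k' + 1 : Nat) : Int) + 0 - a = a * (k' : Int) + 0 := by
        push_cast; ring
      rw [hrem]
      have := ih 0 le_rfl (by
        rcases Nat.eq_zero_or_pos k' with h | h
        · right; exact ⟨h, rfl⟩
        · left; exact_mod_cast h)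
      rw [this]
      have h2 : (((k' + 1 : Nat) : Int) - 0).toNat = ((k' : Int) - 0).toNat + 1 := by
        push_cast; omega
      rw [h2, List.replicate_succ]
      simp

-- ===== VERDICT (by name: the statement is the Claim_ definition above) =====
theorem get_tab_width_py_spec : Claim_equal_get_tab_width_py := by
  intro tabs width field _ hpre
  unfold Pre_get_tab_width_py at hpre
  unfold Spec_get_tab_width_py get_tab_width_py get_tab_width_py_alt
  dsimp only
  have hdm : PySem.Int.divmod? (width - (tabs + 1) - ((tabs + 1) * 2 - 2)) tabs
      = some (PySem.Int.floordiv (width - (tabs + 1) - ((tabs + 1) * 2 - 2)) tabs,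
              PySem.Int.mod (width - (tabs + 1) - ((tabs + 1) * 2 - 2)) tabs) := by
    simp [PySem.Int.divmod?, PySem.Int.floordiv, PySem.Int.mod, hpre]
  rw [hdm]
  dsimp only
  set q := width - (tabs + 1) - ((tabs + 1) * 2 - 2) with hq
  set a := PySem.Int.floordiv q tabs with ha
  set b := PySem.Int.mod q tabs with hbdef
  rcases lt_or_gt_of_ne hpre with hneg | hpos
  · -- tabs < 0 : both sides empty
    rw [PySem.List.pyRange_one_eq_nil (by omega),
        PySem.List.pyRange_neg_one_eq_nil (le_of_lt hneg)]
    simp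
  · -- tabs > 0
    have h0 : 0 ≤ b := PySem.Int.mod_nonneg q hpos
    have hblt : b < tabs := PySem.Int.mod_lt q hpos
    have hqd : q = a * tabs + b := by
      have := PySem.Int.floordiv_mul_add_mod q tabs
      linarith
    have hcast : ((tabs.toNat : Nat) : Int) = tabs := Int.toNat_of_nonneg (le_of_lt hpos)
    have hfold := foldB_eq_pvTakeB field tabs.toNat (width - 3 * tabs - 1) []
    rw [hcast] at hfold
    rw [hfold, List.nil_append]
    have hB : width - 3 * tabs - 1 = a * ((tabs.toNat : Nat) : Int) + b := by
      rw [hcast]; rw [hq] at hqd; linarith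
    rw [hB, pvTakeB_blocks field a tabs.toNat b h0 (by left; rw [hcast]; exact hblt)]
    rw [hcast]
    have hmc : List.map (fun i => (a + if i < b then 1 else 0) - field) (PySem.List.pyRange 0 tabs)
        = List.map (fun i => if i < b then a + 1 - field else a - field) (PySem.List.pyRange 0 tabs) :=
      List.map_congr_left (fun i _ => by by_cases h : i < b <;> simp [h])
    rw [hmc, map_range_split (a + 1 - field) (a - field) tabs b h0 (le_of_lt hblt)]
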